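-- pv_equiv track=rewrite | github.com/opendev-to/opendev-py | ui_textual/runner_components/console_bridge.py | _normalize_console_text
-- ===== SOURCE A (Python) =====
-- def _normalize_console_text(text: str) -> str:
--     """Collapse carriage-return spinner updates into a single line."""
--     if "\r" not in text:
--         return text
--     lines = text.split("\n")
--     for index, line in enumerate(lines):
--         if "\r" in line:
--             lines[index] = line.split("\r")[-1]
--     return "\n".join(lines)
-- ===== SOURCE B (Python) =====
-- def _normalize_console_text(text: str) -> str:
--     """Collapse carriage-return spinner updates into a single line."""
--     out = []
--     cur = []
--     for ch in text:
--         if ch == "\r":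
--             cur = []
--         elif ch == "\n":
--             out += cur
--             out.append("\n")
--             cur = []
--         else:
--             cur.append(ch)
--     return "".join(out + cur)
-- ===== Notes on version B (the rewrite author's own statement) =====
-- stated objective: alternative
-- what changed: Replaces the split-on-newline / per-line split-on-CR / join pipeline with a single left-to-right character scan that clears the current-line buffer whenever a carriage return is seen and flushes it on newline.
import Mathlib
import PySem

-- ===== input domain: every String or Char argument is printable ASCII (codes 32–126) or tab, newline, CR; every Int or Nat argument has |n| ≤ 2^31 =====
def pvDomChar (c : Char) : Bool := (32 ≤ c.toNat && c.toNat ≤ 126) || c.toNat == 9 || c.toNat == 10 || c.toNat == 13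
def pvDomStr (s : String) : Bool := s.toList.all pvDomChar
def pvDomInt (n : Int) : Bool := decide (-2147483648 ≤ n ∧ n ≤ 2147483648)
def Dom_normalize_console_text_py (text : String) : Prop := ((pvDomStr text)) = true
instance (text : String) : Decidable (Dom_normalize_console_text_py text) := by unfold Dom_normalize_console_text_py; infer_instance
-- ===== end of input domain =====

-- B replaces A's split/per-line-split/join pipeline by a single character-scan fold
-- (clear the current-line buffer on '\r', flush it on '\n'); alternative structure, same cost.


-- ===== PORT A =====
-- literal port of A: guard on '\r' in text, split on '\n', replace each line that
-- contains '\r' by line.split('\r')[-1], join with '\n'.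
-- (line.split('\r') is never empty, so Python's [-1] never raises; ported as pyGetD.)
def normalize_console_text_py (text : String) : String :=
  if PySem.Str.isIn "\r" text = false then text
  else
    let lines := PySem.Chars.splitOn text.toList ['\n']
    let lines := lines.map (fun line =>
      if PySem.Chars.isIn ['\r'] line = true then
        PySem.List.pyGetD (PySem.Chars.splitOn line ['\r']) (-1) []
      else line)
    String.ofList (PySem.Chars.join ['\n'] lines)

-- ===== PORT B =====
-- one step of B's scan: state = (flushed output, current line buffer)
def pvAltStep (st : List Char × List Char) (ch : Char) : List Char × List Char :=
  if ch = '\r' then (st.1, [])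
  else if ch = '\n' then (st.1 ++ st.2 ++ ['\n'], [])
  else (st.1, st.2 ++ [ch])

def normalize_console_text_py_alt (text : String) : String :=
  let st := text.toList.foldl pvAltStep ([], [])
  String.ofList (st.1 ++ st.2)

-- ===== PRECONDITION & SPEC =====
def Spec_normalize_console_text_py (text : String) (out : String) : Prop := out = normalize_console_text_py_alt text
instance (text : String) (out : String) : Decidable (Spec_normalize_console_text_py text out) := by unfold Spec_normalize_console_text_py; infer_instance

-- ===== CLAIM (what is proved, stated in full; the proofs are below) =====
def Claim_equal_normalize_console_text_py : Prop := ∀ (text : String), Dom_normalize_console_text_py text → Spec_normalize_console_text_py text (normalize_console_text_py text)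

-- ===== LEMMAS AND PROOFS =====

-- proof-side split on a single character: (first piece, remaining pieces)
def pvSplitC (sep : Char) : List Char → List Char × List (List Char)
  | [] => ([], [])
  | c :: cs =>
    let (h, t) := pvSplitC sep cs
    if c = sep then ([], h :: t) else (c :: h, t)

-- proof-side per-line step of B (no '\n' inside a line)
def pvLineStep (cur : List Char) (ch : Char) : List Char :=
  if ch = '\r' then [] else cur ++ [ch]

-- proof-side join with '\n'
def pvJoinNl : List (List Char) → List Char
  | [] => []
  | [a] => a
  | a :: b :: t => a ++ '\n' :: pvJoinNl (b :: t)

theorem pvGo_eq (sep : Char) : ∀ (cs : List Char) (fuel : Nat) (cur : List Char)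
    (acc : List (List Char)), cs.length ≤ fuel →
    PySem.Chars.splitOn.go [sep] fuel cs cur acc =
      acc.reverse ++ (cur.reverse ++ (pvSplitC sep cs).1) :: (pvSplitC sep cs).2 := by
  intro cs
  induction cs with
  | nil =>
    intro fuel cur acc _
    cases fuel with
    | zero => rw [PySem.Chars.splitOn.go]; simp [pvSplitC]
    | succ f => rw [PySem.Chars.splitOn.go.eq_2 _ (f+1) _ _ (by omega)]; simp [pvSplitC]
  | cons c rest ih =>
    intro fuel cur acc hlen
    cases fuel with
    | zero => simp at hlen
    | succ fuel =>
      rw [PySem.Chars.splitOn.go.eq_3]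
      by_cases h : sep = c
      · subst h
        rw [if_pos (by simp [List.isPrefixOf])]
        rw [show List.drop [sep].length (sep :: rest) = rest from rfl]
        rw [ih fuel [] (cur.reverse :: acc) (by simp at hlen; omega)]
        simp [pvSplitC]
      · rw [if_neg (by simp [List.isPrefixOf]; exact h)]
        rw [ih fuel (c :: cur) acc (by simp at hlen; omega)]
        have hcs : c ≠ sep := fun hc => h hc.symm
        simp [pvSplitC, hcs]

theorem pvSplitOn_eq (sep : Char) (cs : List Char) :
    PySem.Chars.splitOn cs [sep] = (pvSplitC sep cs).1 :: (pvSplitC sep cs).2 := by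
  unfold PySem.Chars.splitOn
  rw [pvGo_eq sep cs (cs.length + 1) [] [] (by omega)]
  simp

theorem pvSplitC_cons_sep (sep : Char) (cs : List Char) :
    pvSplitC sep (sep :: cs) = ([], (pvSplitC sep cs).1 :: (pvSplitC sep cs).2) := by
  cases hp : pvSplitC sep cs with
  | mk h t => simp [pvSplitC, hp]

theorem pvSplitC_cons_ne (sep c : Char) (hc : c ≠ sep) (cs : List Char) :
    pvSplitC sep (c :: cs) = (c :: (pvSplitC sep cs).1, (pvSplitC sep cs).2) := by
  cases hp : pvSplitC sep cs with
  | mk h t => simp [pvSplitC, hp, hc]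

theorem pvSplitC_fst_sep (sep : Char) (cs : List Char) :
    (pvSplitC sep (sep :: cs)).1 = [] := by rw [pvSplitC_cons_sep]

theorem pvSplitC_snd_sep (sep : Char) (cs : List Char) :
    (pvSplitC sep (sep :: cs)).2 = (pvSplitC sep cs).1 :: (pvSplitC sep cs).2 := by
  rw [pvSplitC_cons_sep]

theorem pvSplitC_fst_ne (sep c : Char) (hc : c ≠ sep) (cs : List Char) :
    (pvSplitC sep (c :: cs)).1 = c :: (pvSplitC sep cs).1 := by rw [pvSplitC_cons_ne sep c hc]

theorem pvSplitC_snd_ne (sep c : Char) (hc : c ≠ sep) (cs : List Char) :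
    (pvSplitC sep (c :: cs)).2 = (pvSplitC sep cs).2 := by rw [pvSplitC_cons_ne sep c hc]

theorem pvJoin_eq : ∀ (l : List (List Char)), PySem.Chars.join ['\n'] l = pvJoinNl l
  | [] => by simp [PySem.Chars.join, pvJoinNl, List.intercalate]
  | [a] => by simp [PySem.Chars.join, pvJoinNl, List.intercalate]
  | a :: b :: t => by
    have ih := pvJoin_eq (b :: t)
    show List.intercalate ['\n'] (a :: b :: t) = pvJoinNl (a :: b :: t)
    rw [show List.intercalate ['\n'] (a :: b :: t)
        = a ++ ['\n'] ++ List.intercalate ['\n'] (b :: t) from by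
      simp [List.intercalate, List.intersperse]]
    rw [show List.intercalate ['\n'] (b :: t) = pvJoinNl (b :: t) from ih]
    simp [pvJoinNl]

-- the per-line fold: independent of the buffer once a '\r' occurs
theorem pvLineFold (l : List Char) : ∀ (cur : List Char),
    l.foldl pvLineStep cur =
      if '\r' ∈ l then l.foldl pvLineStep [] else cur ++ l := by
  induction l with
  | nil => intro cur; simp
  | cons c cs ih =>
    intro cur
    by_cases hc : c = '\r'
    · subst hc
      simp [List.foldl_cons, pvLineStep]
    · simp only [List.foldl_cons, pvLineStep, if_neg hc]
      rw [ih (cur ++ [c])]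
      by_cases hm : '\r' ∈ cs
      · rw [if_pos hm, if_pos (List.mem_cons_of_mem c hm)]
        simp only [List.nil_append]
        rw [ih [c], if_pos hm]
      · rw [if_neg hm, if_neg (by simp [hm]; exact fun h => hc h.symm)]
        simp

-- if the separator does not occur, pvSplitC leaves the line whole
theorem pvSplitC_no_sep (sep : Char) : ∀ (l : List Char), sep ∉ l → pvSplitC sep l = (l, []) := by
  intro l
  induction l with
  | nil => intro _; rfl
  | cons c cs ih =>
    intro h
    simp only [List.mem_cons, not_or] at h
    rw [pvSplitC_cons_ne sep c (fun hc => h.1 hc.symm) cs, ih h.2]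

theorem pvSplitC_mem_sep (sep : Char) : ∀ (l : List Char), sep ∈ l → (pvSplitC sep l).2 ≠ [] := by
  intro l
  induction l with
  | nil => intro h; simp at h
  | cons c cs ih =>
    intro h
    by_cases hc : c = sep
    · subst hc; rw [pvSplitC_snd_sep]; simp
    · have hmem : sep ∈ cs := by
        rcases List.mem_cons.mp h with h | h
        · exact absurd h.symm hc
        · exact h
      rw [pvSplitC_snd_ne sep c hc cs]
      exact ih hmem

-- last segment after the final '\r' = B's per-line fold from the empty buffer
theorem pvLastSeg (l : List Char) :
    ((pvSplitC '\r' l).1 :: (pvSplitC '\r' l).2).getLast? =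
      some (l.foldl pvLineStep []) := by
  induction l with
  | nil => rfl
  | cons c cs ih =>
    by_cases hc : c = '\r'
    · subst hc
      rw [pvSplitC_fst_sep, pvSplitC_snd_sep]
      simp only [List.getLast?_cons_cons, List.foldl_cons, pvLineStep]
      exact ih
    · rw [pvSplitC_fst_ne '\r' c hc cs, pvSplitC_snd_ne '\r' c hc cs]
      by_cases hm : '\r' ∈ cs
      · have h2 := pvSplitC_mem_sep '\r' cs hm
        cases hb : (pvSplitC '\r' cs).2 with
        | nil => exact absurd hb h2
        | cons b0 bs =>
          rw [List.getLast?_cons_cons]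
          rw [hb, List.getLast?_cons_cons] at ih
          have hswap : List.foldl pvLineStep [] (c :: cs) = List.foldl pvLineStep [] cs := by
            simp only [List.foldl_cons, pvLineStep, if_neg hc, List.nil_append]
            rw [pvLineFold cs, if_pos hm]
          rw [hswap]
          exact ih
      · rw [pvSplitC_no_sep '\r' cs hm]
        simp only [List.getLast?_singleton, List.foldl_cons, pvLineStep, if_neg hc,
          List.nil_append]
        rw [pvLineFold cs, if_neg hm]
        rfl

-- A's per-line transform equals B's per-line fold
theorem pvLine_eq (line : List Char) :
    (if PySem.Chars.isIn ['\r'] line = true then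
        PySem.List.pyGetD (PySem.Chars.splitOn line ['\r']) (-1) []
      else line) = line.foldl pvLineStep [] := by
  by_cases hm : '\r' ∈ line
  · have hin : PySem.Chars.isIn ['\r'] line = true := by
      cases h : PySem.Chars.isIn ['\r'] line
      · exact absurd ((List.singleton_infix_iff '\r' line).mpr hm)
          ((PySem.Chars.isIn_eq_false_iff _ _).mp h)
      · rfl
    have hne : ((pvSplitC '\r' line).1 :: (pvSplitC '\r' line).2) ≠ [] := by simp
    rw [if_pos hin, pvSplitOn_eq]
    rw [PySem.List.pyGetD_neg_one ((pvSplitC '\r' line).1 :: (pvSplitC '\r' line).2) [] hne]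
    have h1 := pvLastSeg line
    rw [List.getLast?_eq_some_getLast hne] at h1
    exact Option.some_injective _ h1
  · have hin : PySem.Chars.isIn ['\r'] line = false :=
      (PySem.Chars.isIn_eq_false_iff _ _).mpr
        (fun h => hm ((List.singleton_infix_iff '\r' line).mp h))
    rw [hin]
    simp only [Bool.false_eq_true, if_false]
    rw [pvLineFold line, if_neg hm]
    simp

-- main invariant of B's scan, phrased through pvSplitC '\n'
theorem pvMain (cs : List Char) : ∀ (out cur : List Char),
    (cs.foldl pvAltStep (out, cur)).1 ++ (cs.foldl pvAltStep (out, cur)).2 =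
      out ++ pvJoinNl ((pvSplitC '\n' cs).1.foldl pvLineStep cur ::
        (pvSplitC '\n' cs).2.map (fun l => l.foldl pvLineStep [])) := by
  induction cs with
  | nil => intro out cur; simp [pvSplitC, pvJoinNl]
  | cons c cs ih =>
    intro out cur
    by_cases hr : c = '\r'
    · subst hr
      have hstep : pvAltStep (out, cur) '\r' = (out, []) := by simp [pvAltStep]
      rw [List.foldl_cons, hstep, ih out [],
        pvSplitC_fst_ne '\n' '\r' (by decide) cs,
        pvSplitC_snd_ne '\n' '\r' (by decide) cs]
      simp [pvLineStep]
    · by_cases hn : c = '\n'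
      · subst hn
        have hstep : pvAltStep (out, cur) '\n' = (out ++ cur ++ ['\n'], []) := by
          simp [pvAltStep]
        rw [List.foldl_cons, hstep, ih (out ++ cur ++ ['\n']) [],
          pvSplitC_fst_sep '\n' cs, pvSplitC_snd_sep '\n' cs]
        simp only [List.foldl_nil, List.map_cons, pvJoinNl]
        simp
      · have hstep : pvAltStep (out, cur) c = (out, cur ++ [c]) := by
          simp [pvAltStep, hr, hn]
        rw [List.foldl_cons, hstep, ih out (cur ++ [c]),
          pvSplitC_fst_ne '\n' c hn cs, pvSplitC_snd_ne '\n' c hn cs]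
        simp [pvLineStep, hr]

-- when the text has no '\r', the normalized text is the text itself
theorem pvNoCR (cs : List Char) : ∀ (cur : List Char), '\r' ∉ cs →
    pvJoinNl ((pvSplitC '\n' cs).1.foldl pvLineStep cur ::
      (pvSplitC '\n' cs).2.map (fun l => l.foldl pvLineStep [])) = cur ++ cs := by
  induction cs with
  | nil => intro cur _; simp [pvSplitC, pvJoinNl]
  | cons c cs ih =>
    intro cur h
    simp only [List.mem_cons, not_or] at h
    by_cases hn : c = '\n'
    · subst hn
      rw [pvSplitC_fst_sep '\n' cs, pvSplitC_snd_sep '\n' cs]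
      have hrec := ih [] h.2
      simp only [List.nil_append] at hrec
      simp only [List.foldl_nil, List.map_cons, pvJoinNl]
      rw [hrec]
    · have hc : c ≠ '\r' := fun hcc => h.1 hcc.symm
      rw [pvSplitC_fst_ne '\n' c hn cs, pvSplitC_snd_ne '\n' c hn cs]
      have hrec := ih (cur ++ [c]) h.2
      simp only [List.foldl_cons, pvLineStep, if_neg hc]
      simpa using hrec

theorem pvEq (text : String) :
    normalize_console_text_py text = normalize_console_text_py_alt text := by
  unfold normalize_console_text_py normalize_console_text_py_alt
  by_cases hin : PySem.Str.isIn "\r" text = false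
  · rw [if_pos hin]
    have hm : '\r' ∉ text.toList := by
      intro hmem
      have hfalse : PySem.Chars.isIn "\r".toList text.toList = false := by
        rw [← PySem.Str.isIn_eq]; exact hin
      exact (PySem.Chars.isIn_eq_false_iff _ _).mp hfalse
        ((List.singleton_infix_iff '\r' text.toList).mpr hmem)
    simp only
    rw [pvMain text.toList [] [], pvNoCR text.toList [] hm]
    simp
  · rw [if_neg hin]
    simp only
    have hfun : (fun line => if PySem.Chars.isIn ['\r'] line = true then
        PySem.List.pyGetD (PySem.Chars.splitOn line ['\r']) (-1) []
      else line) = (fun l : List Char => l.foldl pvLineStep []) := funext pvLine_eq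
    rw [pvSplitOn_eq, hfun, pvJoin_eq, pvMain text.toList [] []]
    simp

-- ===== VERDICT (by name: the statement is the Claim_ definition above) =====
theorem normalize_console_text_py_spec : Claim_equal_normalize_console_text_py := by
  intro text _
  unfold Spec_normalize_console_text_py
  exact pvEq text
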